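-- pv_equiv track=rewrite | github.com/AnatoliiHevlenko/project_partizan | angrybirds.py | init_field
-- ===== SOURCE A (Python) =====
-- def init_field(Heigt,Width,Start,Finish):       # ініціалізація ігрового поля
--
--     field = [[' '] * Width for i in range(Heigt)]   # створюємо масив - поле
--     field[Start[0]][Start[1]] = 'S'         # початкове положення
--     field[Finish[0]][Finish[1]]= 'F'        # мішень
--
--     for i in range(Heigt):                  # кути поля '+', а сторони '|', '-'
--         for j in range(Width):
--             if (i,j) in ((0,0), (Heigt-1, Width-1),(0, Width-1), (Heigt-1,0)):
--                 field[i][j] = '+'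
--             elif i == 0 or i == Heigt-1 :
--                 field[i][j] = '-'
--             elif j == 0 or j == Width-1 :
--                 field[i][j] = '|'
--     return field
-- ===== SOURCE B (Python) =====
-- def init_field(Heigt, Width, Start, Finish):
--     field = [[' '] * Width for _ in range(Heigt)]
--     field[Start[0]][Start[1]] = 'S'
--     field[Finish[0]][Finish[1]] = 'F'
--     field[0] = ['-'] * Width
--     field[Heigt - 1] = ['-'] * Width
--     for i in range(1, Heigt - 1):
--         field[i][0] = '|'
--         field[i][Width - 1] = '|'
--     for i, j in ((0, 0), (0, Width - 1), (Heigt - 1, 0), (Heigt - 1, Width - 1)):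
--         field[i][j] = '+'
--     return field
-- ===== Notes on version B (the rewrite author's own statement) =====
-- stated objective: simpler
-- what changed: A scans every cell with a nested double loop and per-cell corner/edge branching; B sets the S/F markers and then assigns each border region directly (whole top and bottom rows, the two side columns, then the four corners), with no per-cell conditional scan.
import Mathlib
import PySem

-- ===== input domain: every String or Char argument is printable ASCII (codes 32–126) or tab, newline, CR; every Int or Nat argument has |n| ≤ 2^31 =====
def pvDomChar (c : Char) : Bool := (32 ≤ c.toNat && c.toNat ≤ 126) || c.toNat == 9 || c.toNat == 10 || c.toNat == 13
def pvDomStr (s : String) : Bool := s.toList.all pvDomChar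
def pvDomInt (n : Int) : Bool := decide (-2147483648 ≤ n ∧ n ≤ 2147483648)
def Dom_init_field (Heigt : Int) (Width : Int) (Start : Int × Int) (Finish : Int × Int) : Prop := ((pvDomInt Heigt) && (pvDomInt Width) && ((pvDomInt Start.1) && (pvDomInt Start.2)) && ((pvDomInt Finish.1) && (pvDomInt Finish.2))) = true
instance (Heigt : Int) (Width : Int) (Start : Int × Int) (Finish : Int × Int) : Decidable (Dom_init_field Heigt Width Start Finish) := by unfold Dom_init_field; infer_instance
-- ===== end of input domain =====

-- B replaces A's per-cell double scan with direct region assignments (markers first, then whole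
-- border rows, side columns, corners); objective: simpler structure, same result.


-- ===== PORT A =====
def init_field (Heigt : Int) (Width : Int) (Start : Int × Int) (Finish : Int × Int) : List (List String) :=
  let field := (PySem.List.pyRange 0 Heigt 1).map (fun _ => PySem.List.pyRepeat [" "] Width)
  let field := PySem.List.pySetD field Start.1 (PySem.List.pySetD (PySem.List.pyGetD field Start.1 []) Start.2 "S")
  let field := PySem.List.pySetD field Finish.1 (PySem.List.pySetD (PySem.List.pyGetD field Finish.1 []) Finish.2 "F")
  (PySem.List.pyRange 0 Heigt 1).foldl (fun field i =>
    (PySem.List.pyRange 0 Width 1).foldl (fun field j =>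
      if (i, j) = ((0 : Int), (0 : Int)) ∨ (i, j) = (Heigt - 1, Width - 1) ∨
         (i, j) = ((0 : Int), Width - 1) ∨ (i, j) = (Heigt - 1, (0 : Int)) then
        PySem.List.pySetD field i (PySem.List.pySetD (PySem.List.pyGetD field i []) j "+")
      else if i = 0 ∨ i = Heigt - 1 then
        PySem.List.pySetD field i (PySem.List.pySetD (PySem.List.pyGetD field i []) j "-")
      else if j = 0 ∨ j = Width - 1 then
        PySem.List.pySetD field i (PySem.List.pySetD (PySem.List.pyGetD field i []) j "|")
      else field) field) field

-- ===== PORT B =====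
def init_field_alt (Heigt : Int) (Width : Int) (Start : Int × Int) (Finish : Int × Int) : List (List String) :=
  let field := (PySem.List.pyRange 0 Heigt 1).map (fun _ => PySem.List.pyRepeat [" "] Width)
  let field := PySem.List.pySetD field Start.1 (PySem.List.pySetD (PySem.List.pyGetD field Start.1 []) Start.2 "S")
  let field := PySem.List.pySetD field Finish.1 (PySem.List.pySetD (PySem.List.pyGetD field Finish.1 []) Finish.2 "F")
  let field := PySem.List.pySetD field 0 (PySem.List.pyRepeat ["-"] Width)
  let field := PySem.List.pySetD field (Heigt - 1) (PySem.List.pyRepeat ["-"] Width)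
  let field := (PySem.List.pyRange 1 (Heigt - 1) 1).foldl (fun field i =>
    let field := PySem.List.pySetD field i (PySem.List.pySetD (PySem.List.pyGetD field i []) 0 "|")
    PySem.List.pySetD field i (PySem.List.pySetD (PySem.List.pyGetD field i []) (Width - 1) "|")) field
  [((0 : Int), (0 : Int)), (0, Width - 1), (Heigt - 1, 0), (Heigt - 1, Width - 1)].foldl (fun field ij =>
    PySem.List.pySetD field ij.1 (PySem.List.pySetD (PySem.List.pyGetD field ij.1 []) ij.2 "+")) field

-- ===== PRECONDITION & SPEC =====
-- Pre_: exactly the inputs where Python A returns (the Start/Finish marker writes are in range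
-- Python-style; otherwise A raises IndexError).
def Pre_init_field (Heigt : Int) (Width : Int) (Start : Int × Int) (Finish : Int × Int) : Prop :=
  PySem.Raise.InRange Heigt.toNat Start.1 ∧ PySem.Raise.InRange Width.toNat Start.2 ∧
  PySem.Raise.InRange Heigt.toNat Finish.1 ∧ PySem.Raise.InRange Width.toNat Finish.2
instance (Heigt : Int) (Width : Int) (Start : Int × Int) (Finish : Int × Int) : Decidable (Pre_init_field Heigt Width Start Finish) := by unfold Pre_init_field; infer_instance
def pvWitness_init_field : Int × Int × (Int × Int) × (Int × Int) := (3, 4, (1, 1), (2, 2))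

def Spec_init_field (Heigt : Int) (Width : Int) (Start : Int × Int) (Finish : Int × Int) (out : List (List String)) : Prop := out = init_field_alt Heigt Width Start Finish
instance (Heigt : Int) (Width : Int) (Start : Int × Int) (Finish : Int × Int) (out : List (List String)) : Decidable (Spec_init_field Heigt Width Start Finish out) := by unfold Spec_init_field; infer_instance

-- ===== CLAIM (what is proved, stated in full; the proofs are below) =====
def Claim_equal_init_field : Prop := ∀ (Heigt : Int) (Width : Int) (Start : Int × Int) (Finish : Int × Int), Dom_init_field Heigt Width Start Finish → Pre_init_field Heigt Width Start Finish → Spec_init_field Heigt Width Start Finish (init_field Heigt Width Start Finish)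

-- ===== LEMMAS AND PROOFS =====

-- the common target shape of each row after the border pass
def pvRowT (h w : Nat) (i : Nat) (r : List String) : List String :=
  if i = 0 ∨ i = h - 1 then
    (List.range w).map (fun j => if j = 0 ∨ j = w - 1 then "+" else "-")
  else (r.set 0 "|").set (w - 1) "|"

lemma pv_set_getD_self {α : Type} (l : List α) (n : Nat) (d : α) :
    l.set n (l.getD n d) = l := by
  by_cases h : n < l.length
  · rw [List.getD_eq_getElem l d h, List.set_getElem_self]
  · rw [List.set_eq_of_length_le (by omega)]

lemma pv_getD_set_self {α : Type} (l : List α) (n : Nat) (v d : α) (h : n < l.length) :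
    (l.set n v).getD n d = v := by
  rw [List.getD_eq_getElem _ d (by simpa using h), List.getElem_set_self]

-- writing one row of the grid repeatedly: the whole fold is one row update
lemma pv_foldl_grid_row {α β : Type} (i : Nat) (d : α) (V : β → α → α) :
    ∀ (xs : List β) (g : List α),
      xs.foldl (fun f j => f.set i (V j (f.getD i d))) g
        = g.set i (xs.foldl (fun r j => V j r) (g.getD i d)) := by
  intro xs
  induction xs with
  | nil => intro g; exact (pv_set_getD_self g i d).symm
  | cons x xs ih =>
    intro g
    simp only [List.foldl_cons, ih]
    by_cases h : i < g.length
    · rw [pv_getD_set_self g i _ d h, List.set_set]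
    · simp [List.set_eq_of_length_le (show g.length ≤ i by omega)]

-- writing every position of a contiguous index segment, in order
lemma pv_foldl_set_seg {α : Type} (F : Nat → α → α) (d : α) :
    ∀ (n s : Nat) (g : List α), s + n ≤ g.length →
      (List.range n).foldl (fun f k => f.set (s + k) (F (s + k) (f.getD (s + k) d))) g
        = g.mapIdx (fun k r => if s ≤ k ∧ k < s + n then F k r else r) := by
  intro n
  induction n with
  | zero =>
    intro s g _
    apply List.ext_getElem (by simp)
    intro k h1 h2
    simp only [List.getElem_mapIdx, List.range_zero, List.foldl_nil]
    rw [if_neg (by omega)]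
  | succ n ih =>
    intro s g hlen
    rw [List.range_succ, List.foldl_append, List.foldl_cons, List.foldl_nil,
      ih s g (by omega)]
    have hsn : s + n < g.length := by omega
    have hgd : (List.mapIdx (fun k r => if s ≤ k ∧ k < s + n then F k r else r) g).getD (s + n) d
        = g[s + n] := by
      rw [List.getD_eq_getElem _ d (by simpa using hsn)]
      simp only [List.getElem_mapIdx]
      rw [if_neg (by omega)]
    rw [hgd]
    apply List.ext_getElem (by simp)
    intro k h1 h2
    rw [List.getElem_set]
    simp only [List.getElem_mapIdx]
    split_ifs with e1 e2 e3 <;> first | rfl | omega | (subst e1; rfl)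

lemma pv_mem_of_mem_pySetD {α : Type} {r v : α} {f : List α} {i : Int}
    (h : r ∈ PySem.List.pySetD f i v) : r ∈ f ∨ r = v := by
  unfold PySem.List.pySetD PySem.List.pySet? at h
  cases hk : PySem.List.pyIdx? f.length i with
  | none => rw [hk] at h; simp at h; exact Or.inl h
  | some k =>
    rw [hk] at h; simp at h
    rcases List.mem_or_eq_of_mem_set h with h' | h'
    · exact Or.inl h'
    · exact Or.inr h'

-- per-cell value the border pass writes at column j of row k (x = the old cell)
def pvW (h w k j : Nat) (x : String) : String :=
  if k = 0 ∨ k = h - 1 then (if j = 0 ∨ j = w - 1 then "+" else "-")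
  else if j = 0 ∨ j = w - 1 then "|" else x

-- row k after A's inner loop
def pvRowF (h w k : Nat) (r : List String) : List String :=
  (List.range w).foldl (fun r j => r.set j (pvW h w k j (r.getD j ""))) r

lemma pv_rowF_eq (h w k : Nat) (hw : 1 ≤ w) (r : List String) (hr : r.length = w) :
    pvRowF h w k r = pvRowT h w k r := by
  unfold pvRowF
  have hseg := pv_foldl_set_seg (pvW h w k) "" w 0 r (by omega)
  simp only [Nat.zero_add] at hseg
  rw [hseg]
  unfold pvRowT
  by_cases hb : k = 0 ∨ k = h - 1
  · rw [if_pos hb]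
    apply List.ext_getElem (by simp [hr])
    intro j h1 h2
    have hj : j < w := by simpa [hr] using h1
    simp only [List.getElem_mapIdx, List.getElem_map, List.getElem_range]
    rw [if_pos (by omega)]
    unfold pvW
    rw [if_pos hb]
  · rw [if_neg hb]
    apply List.ext_getElem (by simp [hr])
    intro j h1 h2
    have hj : j < w := by simpa [hr] using h1
    simp only [List.getElem_mapIdx, List.getElem_set]
    rw [if_pos (show 0 ≤ j ∧ j < w by omega)]
    unfold pvW
    rw [if_neg hb]
    by_cases cj : j = 0 ∨ j = w - 1
    · rw [if_pos cj]
      by_cases c2 : w - 1 = j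
      · rw [if_pos c2]
      · rw [if_neg c2, if_pos (by omega)]
    · rw [if_neg cj, if_neg (by omega), if_neg (by omega)]

-- the "+"-cornered border row
lemma pv_R0_eq (w : Nat) (hw : 1 ≤ w) :
    ((List.replicate w "-").set 0 "+").set (w - 1) "+"
      = (List.range w).map (fun j => if j = 0 ∨ j = w - 1 then "+" else "-") := by
  apply List.ext_getElem (by simp)
  intro j h1 h2
  simp only [List.getElem_set, List.getElem_map, List.getElem_range, List.getElem_replicate]
  split_ifs <;> first | rfl | omega

lemma pv_R0_idem (w : Nat) (hw : 1 ≤ w) :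
    (((List.range w).map (fun j => if j = 0 ∨ j = w - 1 then "+" else "-")).set 0 "+").set (w - 1) "+"
      = (List.range w).map (fun j => if j = 0 ∨ j = w - 1 then "+" else "-") := by
  apply List.ext_getElem (by simp)
  intro j h1 h2
  simp only [List.getElem_set, List.getElem_map, List.getElem_range]
  split_ifs <;> first | rfl | omega

-- A's border double-loop rewrites the marker grid M into M.mapIdx (pvRowT h w)
lemma pv_A_loop_eq (h w : Nat) (hh : 1 ≤ h) (hw : 1 ≤ w) (M : List (List String))
    (hlen : M.length = h) (hrow : ∀ r ∈ M, r.length = w) :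
    (PySem.List.pyRange 0 (h : Int) 1).foldl (fun field i =>
      (PySem.List.pyRange 0 (w : Int) 1).foldl (fun field j =>
        if (i, j) = ((0 : Int), (0 : Int)) ∨ (i, j) = ((h : Int) - 1, (w : Int) - 1) ∨
           (i, j) = ((0 : Int), (w : Int) - 1) ∨ (i, j) = ((h : Int) - 1, (0 : Int)) then
          PySem.List.pySetD field i (PySem.List.pySetD (PySem.List.pyGetD field i []) j "+")
        else if i = 0 ∨ i = (h : Int) - 1 then
          PySem.List.pySetD field i (PySem.List.pySetD (PySem.List.pyGetD field i []) j "-")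
        else if j = 0 ∨ j = (w : Int) - 1 then
          PySem.List.pySetD field i (PySem.List.pySetD (PySem.List.pyGetD field i []) j "|")
        else field) field) M
    = M.mapIdx (pvRowT h w) := by
  have hc : ((h : Int)) - 1 = ((h - 1 : Nat) : Int) := by omega
  have wc : ((w : Int)) - 1 = ((w - 1 : Nat) : Int) := by omega
  simp only [hc, wc, PySem.List.pyRange_zero_nat, List.foldl_map]
  refine Eq.trans (List.foldl_ext _
    (fun (f : List (List String)) (k : Nat) => f.set k (pvRowF h w k (f.getD k []))) M ?_) ?_
  · intro f k _
    refine Eq.trans (List.foldl_ext _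
      (fun (field : List (List String)) (j : Nat) =>
        field.set k ((field.getD k []).set j (pvW h w k j ((field.getD k []).getD j "")))) f ?_) ?_
    · intro f' j _
      simp only [PySem.List.pySetD_natCast, PySem.List.pyGetD_natCast, Prod.mk.injEq]
      by_cases c2 : k = 0 ∨ k = h - 1 <;> by_cases c3 : j = 0 ∨ j = w - 1
      · rw [if_pos (by omega)]
        unfold pvW
        rw [if_pos c2, if_pos c3]
      · rw [if_neg (by omega), if_pos (by omega)]
        unfold pvW
        rw [if_pos c2, if_neg c3]
      · rw [if_neg (by omega), if_neg (by omega), if_pos (by omega)]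
        unfold pvW
        rw [if_neg c2, if_pos c3]
      · rw [if_neg (by omega), if_neg (by omega), if_neg (by omega)]
        unfold pvW
        rw [if_neg c2, if_neg c3, pv_set_getD_self, pv_set_getD_self]
    · exact pv_foldl_grid_row k []
        (fun j r => r.set j (pvW h w k j (r.getD j ""))) (List.range w) f
  · have hseg := pv_foldl_set_seg (pvRowF h w) [] h 0 M (by omega)
    simp only [Nat.zero_add] at hseg
    rw [hseg]
    apply List.ext_getElem (by simp)
    intro i h1 h2
    simp only [List.getElem_mapIdx]
    rw [if_pos (show 0 ≤ i ∧ i < h by constructor <;> [omega; simpa [hlen] using h2])]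
    exact pv_rowF_eq h w i hw _ (hrow _ (List.getElem_mem _))

-- the four corner writes, on a grid whose top and bottom rows are already all "-"
lemma pv_corner_chain (h w : Nat) (hh : 1 ≤ h) (hw : 1 ≤ w) (G : List (List String))
    (hGlen : G.length = h)
    (hG0 : G.getD 0 [] = List.replicate w "-")
    (hGtop : G.getD (h - 1) [] = List.replicate w "-") :
    ((((G.set 0 ((G.getD 0 []).set 0 "+")).set 0 (((G.set 0 ((G.getD 0 []).set 0 "+")).getD 0 []).set (w - 1) "+")).set (h - 1) ((((G.set 0 ((G.getD 0 []).set 0 "+")).set 0 (((G.set 0 ((G.getD 0 []).set 0 "+")).getD 0 []).set (w - 1) "+")).getD (h - 1) []).set 0 "+")).set (h - 1) (((((G.set 0 ((G.getD 0 []).set 0 "+")).set 0 (((G.set 0 ((G.getD 0 []).set 0 "+")).getD 0 []).set (w - 1) "+")).set (h - 1) ((((G.set 0 ((G.getD 0 []).set 0 "+")).set 0 (((G.set 0 ((G.getD 0 []).set 0 "+")).getD 0 []).set (w - 1) "+")).getD (h - 1) []).set 0 "+")).getD (h - 1) []).set (w - 1) "+"))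
      = G.mapIdx (fun i r => if i = 0 ∨ i = h - 1 then
          (List.range w).map (fun j => if j = 0 ∨ j = w - 1 then "+" else "-") else r) := by
  have h0 : 0 < G.length := by omega
  have hGtop' : ∀ (hl : h - 1 < G.length), G[h - 1] = List.replicate w "-" := by
    intro hl
    rw [← List.getD_eq_getElem G [] hl]
    exact hGtop
  rw [hG0]
  have hA : (G.set 0 ((List.replicate w "-").set 0 "+")).getD 0 [] = ((List.replicate w "-").set 0 "+") := pv_getD_set_self G 0 ((List.replicate w "-").set 0 "+") [] h0
  rw [hA]
  by_cases hone : h = 1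
  · rw [show h - 1 = 0 from by omega]
    have hB : ((G.set 0 ((List.replicate w "-").set 0 "+")).set 0 (((List.replicate w "-").set 0 "+").set (w - 1) "+")).getD 0 [] = (((List.replicate w "-").set 0 "+").set (w - 1) "+") :=
      pv_getD_set_self (G.set 0 ((List.replicate w "-").set 0 "+")) 0 (((List.replicate w "-").set 0 "+").set (w - 1) "+") [] (by simpa using h0)
    rw [hB]
    have hC : (((G.set 0 ((List.replicate w "-").set 0 "+")).set 0 (((List.replicate w "-").set 0 "+").set (w - 1) "+")).set 0 ((((List.replicate w "-").set 0 "+").set (w - 1) "+").set 0 "+")).getD 0 [] = (((List.replicate w "-").set 0 "+").set (w - 1) "+").set 0 "+" :=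
      pv_getD_set_self ((G.set 0 ((List.replicate w "-").set 0 "+")).set 0 (((List.replicate w "-").set 0 "+").set (w - 1) "+")) 0 ((((List.replicate w "-").set 0 "+").set (w - 1) "+").set 0 "+") [] (by simpa using h0)
    rw [hC]
    apply List.ext_getElem (by simp)
    intro i h1 h2
    have hi : i = 0 := by simp [hGlen, hone] at h2; omega
    subst hi
    simp only [List.getElem_set, List.getElem_mapIdx]
    norm_num
    rw [pv_R0_eq w hw, pv_R0_idem w hw]
  · have hT : ((G.set 0 ((List.replicate w "-").set 0 "+")).set 0 (((List.replicate w "-").set 0 "+").set (w - 1) "+")).getD (h - 1) [] = List.replicate w "-" := by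
      rw [List.getD_eq_getElem _ _ (by simp only [List.length_set]; omega)]
      simp only [List.getElem_set]
      rw [if_neg (by omega), if_neg (by omega)]
      exact hGtop' (by omega)
    rw [hT]
    have hT2 : (((G.set 0 ((List.replicate w "-").set 0 "+")).set 0 (((List.replicate w "-").set 0 "+").set (w - 1) "+")).set (h - 1) ((List.replicate w "-").set 0 "+")).getD (h - 1) [] = ((List.replicate w "-").set 0 "+") :=
      pv_getD_set_self ((G.set 0 ((List.replicate w "-").set 0 "+")).set 0 (((List.replicate w "-").set 0 "+").set (w - 1) "+")) (h - 1) ((List.replicate w "-").set 0 "+") []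
        (by simp only [List.length_set]; omega)
    rw [hT2]
    apply List.ext_getElem (by simp)
    intro i h1 h2
    have hi : i < h := by simp only [List.length_mapIdx, hGlen] at h2; exact h2
    simp only [List.getElem_set, List.getElem_mapIdx]
    by_cases e1 : i = h - 1
    · rw [if_pos (by omega), if_pos (Or.inr e1), pv_R0_eq w hw]
    · by_cases e2 : i = 0
      · rw [if_neg (by omega), if_neg (by omega), if_pos (by omega),
          if_pos (Or.inl e2), pv_R0_eq w hw]
      · rw [if_neg (by omega), if_neg (by omega), if_neg (by omega), if_neg (by omega),
          if_neg (by omega)]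

-- B's direct region assignments rewrite the marker grid M into the same M.mapIdx (pvRowT h w)
lemma pv_B_chain_eq (h w : Nat) (hh : 1 ≤ h) (hw : 1 ≤ w) (M : List (List String))
    (hlen : M.length = h) :
    ([((0 : Int), (0 : Int)), (0, (w : Int) - 1), ((h : Int) - 1, 0), ((h : Int) - 1, (w : Int) - 1)].foldl
      (fun field ij => PySem.List.pySetD field ij.1 (PySem.List.pySetD (PySem.List.pyGetD field ij.1 []) ij.2 "+"))
      ((PySem.List.pyRange 1 ((h : Int) - 1) 1).foldl (fun field i =>
        let field := PySem.List.pySetD field i (PySem.List.pySetD (PySem.List.pyGetD field i []) 0 "|")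
        PySem.List.pySetD field i (PySem.List.pySetD (PySem.List.pyGetD field i []) ((w : Int) - 1) "|"))
        (PySem.List.pySetD (PySem.List.pySetD M 0 (PySem.List.pyRepeat ["-"] (w : Int)))
          ((h : Int) - 1) (PySem.List.pyRepeat ["-"] (w : Int)))))
    = M.mapIdx (pvRowT h w) := by
  have hc : ((h : Int)) - 1 = ((h - 1 : Nat) : Int) := by omega
  have wc : ((w : Int)) - 1 = ((w - 1 : Nat) : Int) := by omega
  rw [hc, wc]
  rw [show (PySem.List.pySetD (PySem.List.pySetD M 0 (PySem.List.pyRepeat ["-"] (w : Int)))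
      ((h - 1 : Nat) : Int) (PySem.List.pyRepeat ["-"] (w : Int)))
    = (M.set 0 (List.replicate w "-")).set (h - 1) (List.replicate w "-") by
    rw [show (0 : Int) = ((0 : Nat) : Int) from rfl]
    simp only [PySem.List.pyRepeat_singleton, Int.toNat_natCast, PySem.List.pySetD_natCast]]
  have hmid : (PySem.List.pyRange 1 (((h - 1 : Nat) : Int)) 1).foldl (fun field i =>
        let field := PySem.List.pySetD field i (PySem.List.pySetD (PySem.List.pyGetD field i []) 0 "|")
        PySem.List.pySetD field i (PySem.List.pySetD (PySem.List.pyGetD field i []) (((w - 1 : Nat) : Int)) "|")) ((M.set 0 (List.replicate w "-")).set (h - 1) (List.replicate w "-"))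
      = (List.mapIdx (fun k r => if 1 ≤ k ∧ k < 1 + (h - 2) then (r.set 0 "|").set (w - 1) "|" else r) ((M.set 0 (List.replicate w "-")).set (h - 1) (List.replicate w "-"))) := by
    rw [PySem.List.pyRange_one]
    have hn : ((((h - 1 : Nat) : Int)) - 1).toNat = h - 2 := by omega
    rw [hn, List.foldl_map]
    refine Eq.trans (List.foldl_ext _
      (fun (f : List (List String)) (k : Nat) =>
        f.set (1 + k) (((f.getD (1 + k) []).set 0 "|").set (w - 1) "|")) ((M.set 0 (List.replicate w "-")).set (h - 1) (List.replicate w "-")) ?_) ?_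
    · intro f k _
      show PySem.List.pySetD
          (PySem.List.pySetD f (1 + (k : Int))
            (PySem.List.pySetD (PySem.List.pyGetD f (1 + (k : Int)) []) 0 "|"))
          (1 + (k : Int))
          (PySem.List.pySetD
            (PySem.List.pyGetD
              (PySem.List.pySetD f (1 + (k : Int))
                (PySem.List.pySetD (PySem.List.pyGetD f (1 + (k : Int)) []) 0 "|"))
              (1 + (k : Int)) [])
            (((w - 1 : Nat) : Int)) "|")
        = f.set (1 + k) (((f.getD (1 + k) []).set 0 "|").set (w - 1) "|")
      rw [show ((1 : Int) + (k : Int)) = ((1 + k : Nat) : Int) by push_cast; ring,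
        show (0 : Int) = ((0 : Nat) : Int) from rfl]
      simp only [PySem.List.pySetD_natCast, PySem.List.pyGetD_natCast]
      by_cases hlt : 1 + k < f.length
      · rw [pv_getD_set_self _ _ _ _ hlt, List.set_set]
      · simp [List.set_eq_of_length_le (show f.length ≤ 1 + k by omega)]
    · exact pv_foldl_set_seg (fun _ r => (r.set 0 "|").set (w - 1) "|") [] (h - 2) 1 ((M.set 0 (List.replicate w "-")).set (h - 1) (List.replicate w "-"))
        (by simp only [List.length_set, hlen]; omega)
  rw [hmid]
  simp only [List.foldl_cons, List.foldl_nil]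
  rw [show (0 : Int) = ((0 : Nat) : Int) from rfl]
  simp only [PySem.List.pySetD_natCast, PySem.List.pyGetD_natCast]
  have hGGlen : (List.mapIdx (fun k r => if 1 ≤ k ∧ k < 1 + (h - 2) then (r.set 0 "|").set (w - 1) "|" else r) ((M.set 0 (List.replicate w "-")).set (h - 1) (List.replicate w "-"))).length = h := by
    simp only [List.length_mapIdx, List.length_set, hlen]
  have hg0 : (List.mapIdx (fun k r => if 1 ≤ k ∧ k < 1 + (h - 2) then (r.set 0 "|").set (w - 1) "|" else r) ((M.set 0 (List.replicate w "-")).set (h - 1) (List.replicate w "-"))).getD 0 [] = List.replicate w "-" := by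
    rw [List.getD_eq_getElem _ _ (by simp only [List.length_mapIdx, List.length_set, hlen]; omega)]
    simp only [List.getElem_mapIdx, List.getElem_set]
    rw [if_neg (by omega)]
    split_ifs <;> rfl
  have hgtop : (List.mapIdx (fun k r => if 1 ≤ k ∧ k < 1 + (h - 2) then (r.set 0 "|").set (w - 1) "|" else r) ((M.set 0 (List.replicate w "-")).set (h - 1) (List.replicate w "-"))).getD (h - 1) [] = List.replicate w "-" := by
    rw [List.getD_eq_getElem _ _ (by simp only [List.length_mapIdx, List.length_set, hlen]; omega)]
    simp only [List.getElem_mapIdx, List.getElem_set]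
    rw [if_neg (by omega)]
    simp
  rw [pv_corner_chain h w hh hw (List.mapIdx (fun k r => if 1 ≤ k ∧ k < 1 + (h - 2) then (r.set 0 "|").set (w - 1) "|" else r) ((M.set 0 (List.replicate w "-")).set (h - 1) (List.replicate w "-"))) hGGlen hg0 hgtop]
  apply List.ext_getElem (by simp [hlen])
  intro i h1 h2
  have hi : i < h := by simp only [List.length_mapIdx, hlen] at h2; exact h2
  simp only [List.getElem_mapIdx, List.getElem_set]
  unfold pvRowT
  by_cases e1 : i = 0 ∨ i = h - 1
  · rw [if_pos e1, if_pos e1]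
  · rw [if_neg e1, if_neg e1, if_pos (by omega), if_neg (by omega), if_neg (by omega)]

-- ===== VERDICT (by name: the statement is the Claim_ definition above) =====
theorem init_field_spec : Claim_equal_init_field := by
  intro Heigt Width Start Finish _ hpre
  obtain ⟨hS1, hS2, hF1, hF2⟩ := hpre
  unfold Spec_init_field init_field init_field_alt
  have hh1 : 1 ≤ Heigt.toNat := by rcases hS1 with ⟨a, b⟩; omega
  have hw1 : 1 ≤ Width.toNat := by rcases hS2 with ⟨a, b⟩; omega
  have hH : Heigt = (Heigt.toNat : Int) := by omega
  have hW : Width = (Width.toNat : Int) := by omega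
  rw [hH, hW]
  set h := Heigt.toNat
  set w := Width.toNat
  set base := (PySem.List.pyRange 0 (h : Int) 1).map (fun _ => PySem.List.pyRepeat [" "] (w : Int)) with hbase
  have hbl : base.length = h := by
    rw [hbase, List.length_map]; simp [PySem.List.pyRange_zero_nat]
  have hrowbase : ∀ r ∈ base, r.length = w := by
    intro r hr
    rcases List.mem_map.mp hr with ⟨_, _, rfl⟩
    simp [PySem.List.pyRepeat_singleton]
  set rS := PySem.List.pySetD (PySem.List.pyGetD base Start.1 []) Start.2 "S" with hrS
  set M1 := PySem.List.pySetD base Start.1 rS with hM1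
  have h1l : M1.length = h := by rw [hM1, PySem.List.length_pySetD, hbl]
  have h1r : ∀ r ∈ M1, r.length = w := by
    intro r hr
    rcases pv_mem_of_mem_pySetD hr with h' | h'
    · exact hrowbase r h'
    · rw [h', hrS, PySem.List.length_pySetD]
      exact hrowbase _ (PySem.List.pyGetD_mem base [] (hbl ▸ hS1))
  set rF := PySem.List.pySetD (PySem.List.pyGetD M1 Finish.1 []) Finish.2 "F" with hrF
  set M := PySem.List.pySetD M1 Finish.1 rF with hM
  have hlen : M.length = h := by rw [hM, PySem.List.length_pySetD, h1l]
  have hrow : ∀ r ∈ M, r.length = w := by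
    intro r hr
    rcases pv_mem_of_mem_pySetD hr with h' | h'
    · exact h1r r h'
    · rw [h', hrF, PySem.List.length_pySetD]
      exact h1r _ (PySem.List.pyGetD_mem M1 [] (h1l ▸ hF1))
  rw [pv_A_loop_eq h w hh1 hw1 M hlen hrow, pv_B_chain_eq h w hh1 hw1 M hlen]
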